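-- pv_equiv track=rewrite | github.com/noltron000/practice-problems | angles.py | solution
-- ===== SOURCE A (Python) =====
-- def solution(angles):
-- 	# track extra opened and closed brackets.
-- 	extra_closed = 0
-- 	extra_opened = 0
--
-- 	# loop through every angle in the list.
-- 	for angle in angles:
--
-- 		if angle == '>':
-- 			# there are no open brackets so this is extra!
-- 			if extra_opened == 0:
-- 				extra_closed += 1
-- 			# this bracket is just closing an open one.
-- 			else:
-- 				extra_opened -= 1
--
-- 		# matched brackets will be subtracted in the first if statement.
-- 		elif angle == '<':
-- 			extra_opened += 1
--
-- 	# manipulate result string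
-- 	result = angles
-- 	result = '<' * extra_closed + result
-- 	result = result + '>' * extra_opened
-- 	return result
-- ===== SOURCE B (Python) =====
-- def solution(angles):
-- 	# Fixpoint pair-cancellation: keep only the brackets, then repeatedly delete the
-- 	# first adjacent "<>" pair until none remains; the irreducible remainder has the
-- 	# shape '>'*a + '<'*b, so a opening brackets are prepended and b closing appended.
-- 	brackets = ''.join(c for c in angles if c in '<>')
-- 	while True:
-- 		i = brackets.find('<>')
-- 		if i == -1:
-- 			break
-- 		brackets = brackets[:i] + brackets[i + 2:]
-- 	return '<' * brackets.count('>') + angles + '>' * brackets.count('<')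
-- ===== Notes on version B (the rewrite author's own statement) =====
-- stated objective: alternative
-- what changed: Replaces A's one-pass clamped counters with fixpoint rewriting: filter the brackets, repeatedly delete the first adjacent '<>' pair until irreducible, and read the needed paddings off the '>'*a+'<'*b remainder.
import Mathlib
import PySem

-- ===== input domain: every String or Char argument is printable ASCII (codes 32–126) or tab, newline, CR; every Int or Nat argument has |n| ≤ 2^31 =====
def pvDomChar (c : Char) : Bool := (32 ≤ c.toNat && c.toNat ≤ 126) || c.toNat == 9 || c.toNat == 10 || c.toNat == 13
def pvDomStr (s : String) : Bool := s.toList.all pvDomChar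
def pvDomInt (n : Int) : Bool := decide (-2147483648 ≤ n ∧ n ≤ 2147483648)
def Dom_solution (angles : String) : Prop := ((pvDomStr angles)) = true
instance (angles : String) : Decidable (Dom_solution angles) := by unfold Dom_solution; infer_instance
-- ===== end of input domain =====

-- B replaces A's one-pass clamped counters with fixpoint pair-cancellation on the bracket
-- substring ("<>" deleted repeatedly until irreducible); same return value.

-- ===== PORT A =====
-- A's loop state: (extra_closed, extra_opened)
def solLoopA : List Char → Int × Int → Int × Int
  | [], s => s
  | c :: rest, (ec, eo) =>
    solLoopA rest
      (if c = '>' then (if eo = 0 then (ec + 1, eo) else (ec, eo - 1))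
       else if c = '<' then (ec, eo + 1)
       else (ec, eo))

def solution (angles : String) : String :=
  let s := solLoopA angles.toList (0, 0)
  String.ofList (List.replicate s.1.toNat '<') ++ angles ++ String.ofList (List.replicate s.2.toNat '>')

-- ===== PORT B =====
-- brackets.find('<>') followed by deletion of the found pair: removes the FIRST adjacent
-- "<>" pair, returning none when there is no occurrence (find = -1).
def cancelOnce : List Char → Option (List Char)
  | c1 :: c2 :: rest =>
    if c1 = '<' ∧ c2 = '>' then some rest
    else (cancelOnce (c2 :: rest)).map (c1 :: ·)
  | _ => none

theorem cancelOnce_length : ∀ (l l' : List Char), cancelOnce l = some l' → l'.length < l.length := by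
  intro l
  induction l with
  | nil => intro l' h; simp [cancelOnce] at h
  | cons c rest ih =>
    intro l' h
    match rest with
    | [] => simp [cancelOnce] at h
    | c2 :: r =>
      simp only [cancelOnce] at h
      split at h
      · injection h with h'; subst h'; simp
      · cases hm : cancelOnce (c2 :: r) with
        | none => rw [hm] at h; simp at h
        | some m =>
          rw [hm] at h; simp only [Option.map_some] at h
          injection h with h'; subst h'
          have := ih m hm
          simpa using Nat.succ_lt_succ this

-- B's while loop: delete the first "<>" pair until find returns -1.
def reduceAll (l : List Char) : List Char :=
  match h : cancelOnce l with
  | some l' => reduceAll l'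
  | none => l
termination_by l.length
decreasing_by exact cancelOnce_length _ _ h

def solution_alt (angles : String) : String :=
  let brackets := reduceAll (angles.toList.filter (fun c => c == '<' || c == '>'))
  String.ofList (List.replicate (brackets.count '>') '<') ++ angles
    ++ String.ofList (List.replicate (brackets.count '<') '>')

-- ===== PRECONDITION & SPEC =====
def Spec_solution (angles : String) (out : String) : Prop := out = solution_alt angles
instance (angles : String) (out : String) : Decidable (Spec_solution angles out) := by unfold Spec_solution; infer_instance

-- ===== CLAIM (what is proved, stated in full; the proofs are below) =====
def Claim_equal_solution : Prop := ∀ (angles : String), Dom_solution angles → Spec_solution angles (solution angles)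

-- ===== LEMMAS AND PROOFS =====

theorem solLoopA_cons (c : Char) (rest : List Char) (ec eo : Int) :
    solLoopA (c :: rest) (ec, eo) = solLoopA rest
      (if c = '>' then (if eo = 0 then (ec + 1, eo) else (ec, eo - 1))
       else if c = '<' then (ec, eo + 1) else (ec, eo)) := rfl

-- A's loop ignores non-bracket characters.
theorem solLoopA_filter : ∀ (l : List Char) (s : Int × Int),
    solLoopA l s = solLoopA (l.filter (fun c => c == '<' || c == '>')) s := by
  intro l
  induction l with
  | nil => intro s; rfl
  | cons c rest ih =>
    intro s
    obtain ⟨ec, eo⟩ := s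
    by_cases h1 : c = '<'
    · subst h1; simpa [solLoopA, List.filter] using ih _
    · by_cases h2 : c = '>'
      · subst h2; simpa [solLoopA, List.filter] using ih _
      · have : (c == '<' || c == '>') = false := by simp [h1, h2]
        simp [solLoopA, List.filter, this, h1, h2, ih]

theorem solLoopA_append : ∀ (u v : List Char) (s : Int × Int),
    solLoopA (u ++ v) s = solLoopA v (solLoopA u s) := by
  intro u
  induction u with
  | nil => intro v s; rfl
  | cons c rest ih => intro v s; obtain ⟨ec, eo⟩ := s; simp [solLoopA, ih]

-- Deleting an adjacent "<>" pair does not change A's loop result (on nonnegative eo).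
theorem solLoopA_cancel : ∀ (l l' : List Char), cancelOnce l = some l' →
    ∀ (ec eo : Int), 0 ≤ eo → solLoopA l (ec, eo) = solLoopA l' (ec, eo) := by
  intro l
  induction l with
  | nil => intro l' h; simp [cancelOnce] at h
  | cons c rest ih =>
    intro l' h ec eo heo
    match rest with
    | [] => simp [cancelOnce] at h
    | c2 :: r =>
      simp only [cancelOnce] at h
      split at h
      · next hp =>
        obtain ⟨h1, h2⟩ := hp; subst h1; subst h2
        injection h with h'; subst h'
        rw [solLoopA_cons, if_neg (by decide), if_pos rfl,
            solLoopA_cons, if_pos rfl, if_neg (by omega : ¬ (eo + 1 = 0))]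
        norm_num
      · cases hm : cancelOnce (c2 :: r) with
        | none => rw [hm] at h; simp at h
        | some m =>
          rw [hm] at h; simp only [Option.map_some] at h
          injection h with h'; subst h'
          rw [solLoopA_cons c (c2 :: r), solLoopA_cons c m]
          have hs : ∀ (p : Int × Int), 0 ≤ p.2 → solLoopA (c2 :: r) p = solLoopA m p := by
            intro p hp
            have := ih m hm p.1 p.2 hp
            simpa using this
          apply hs
          split_ifs <;> simp <;> omega

theorem solLoopA_reduceAll : ∀ (l : List Char) (ec eo : Int), 0 ≤ eo →
    solLoopA l (ec, eo) = solLoopA (reduceAll l) (ec, eo) := by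
  intro l
  induction l using reduceAll.induct with
  | case1 l l' h ih =>
    intro ec eo heo
    rw [reduceAll, h, solLoopA_cancel l l' h ec eo heo]
    exact ih ec eo heo
  | case2 l h =>
    intro ec eo heo
    rw [reduceAll, h]

-- cancelOnce only removes elements.
theorem cancelOnce_mem : ∀ (l l' : List Char), cancelOnce l = some l' →
    ∀ c ∈ l', c ∈ l := by
  intro l
  induction l with
  | nil => intro l' h; simp [cancelOnce] at h
  | cons c rest ih =>
    intro l' h
    match rest with
    | [] => simp [cancelOnce] at h
    | c2 :: r =>
      simp only [cancelOnce] at h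
      split at h
      · injection h with h'; subst h'
        intro x hx
        exact List.mem_cons_of_mem _ (List.mem_cons_of_mem _ hx)
      · cases hm : cancelOnce (c2 :: r) with
        | none => rw [hm] at h; simp at h
        | some m =>
          rw [hm] at h; simp only [Option.map_some] at h
          injection h with h'; subst h'
          intro x hx
          rcases List.mem_cons.mp hx with hx1 | hx1
          · subst hx1; simp
          · exact List.mem_cons_of_mem _ (ih m hm x hx1)

theorem reduceAll_mem : ∀ (l : List Char), ∀ c ∈ reduceAll l, c ∈ l := by
  intro l
  induction l using reduceAll.induct with
  | case1 l l' h ih =>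
    intro c hc
    rw [reduceAll, h] at hc
    exact cancelOnce_mem l l' h c (ih c hc)
  | case2 l h => intro c hc; rwa [reduceAll, h] at hc

theorem reduceAll_irred : ∀ (l : List Char), cancelOnce (reduceAll l) = none := by
  intro l
  induction l using reduceAll.induct with
  | case1 l l' h ih => rw [reduceAll, h]; exact ih
  | case2 l h => rw [reduceAll, h]; exact h

-- An irreducible all-bracket list is '>'^a ++ '<'^b.
theorem irred_shape : ∀ (l : List Char), (∀ c ∈ l, c = '<' ∨ c = '>') →
    cancelOnce l = none →
    l = List.replicate (l.count '>') '>' ++ List.replicate (l.count '<') '<' := by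
  intro l
  induction l with
  | nil => intro _ _; rfl
  | cons c rest ih =>
    intro hall h
    match rest with
    | [] =>
      rcases hall c (by simp) with hc | hc <;> subst hc <;> simp
    | c2 :: r =>
      simp only [cancelOnce] at h
      have hnp : ¬ (c = '<' ∧ c2 = '>') := by
        intro hp; rw [if_pos hp] at h; simp at h
      rw [if_neg hnp] at h
      have hrest : cancelOnce (c2 :: r) = none := by
        cases hm : cancelOnce (c2 :: r) with
        | none => rfl
        | some m => rw [hm] at h; simp at h
      have ihr := ih (fun x hx => hall x (List.mem_cons_of_mem _ hx)) hrest
      rcases hall c (by simp) with hc | hc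
      · -- c = '<' : then c2 ≠ '>' so c2 = '<', and the '>'-block of rest is empty
        subst hc
        have hc2 : c2 = '<' := by
          rcases hall c2 (by simp) with h2 | h2
          · exact h2
          · exact absurd ⟨rfl, h2⟩ hnp
        have ha : (c2 :: r).count '>' = 0 := by
          cases ha : (c2 :: r).count '>' with
          | zero => rfl
          | succ n =>
            exfalso
            have hsh := ihr
            rw [ha, List.replicate_succ, List.cons_append] at hsh
            injection hsh with h1 _
            rw [hc2] at h1
            exact absurd h1 (by decide)
        have hshrest : c2 :: r = List.replicate ((c2 :: r).count '<') '<' := by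
          rw [ihr, ha]; simp
        rw [show List.count '>' ('<' :: c2 :: r) = 0 from by simp [ha],
            show List.count '<' ('<' :: c2 :: r) = (c2 :: r).count '<' + 1 from by
              simp [List.count_cons]]
        rw [List.replicate_succ]
        simp only [List.replicate, List.nil_append]
        conv_lhs => rw [hshrest]
      · subst hc
        rw [show List.count '>' ('>' :: c2 :: r) = (c2 :: r).count '>' + 1 from by
              simp [List.count_cons],
            show List.count '<' ('>' :: c2 :: r) = (c2 :: r).count '<' from by
              simp [List.count_cons]]
        rw [List.replicate_succ, List.cons_append]
        exact congrArg (List.cons '>') ihr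

theorem solLoopA_gt : ∀ (a : ℕ) (ec : Int),
    solLoopA (List.replicate a '>') (ec, 0) = (ec + a, 0) := by
  intro a
  induction a with
  | zero => intro ec; simp [solLoopA]
  | succ n ih =>
    intro ec
    rw [List.replicate_succ, solLoopA_cons, if_pos rfl, if_pos rfl, ih (ec + 1)]
    simp [Prod.ext_iff]; ring

theorem solLoopA_lt : ∀ (b : ℕ) (ec eo : Int),
    solLoopA (List.replicate b '<') (ec, eo) = (ec, eo + b) := by
  intro b
  induction b with
  | zero => intro ec eo; simp [solLoopA]
  | succ n ih =>
    intro ec eo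
    rw [List.replicate_succ, solLoopA_cons, if_neg (by decide), if_pos rfl, ih ec (eo + 1)]
    simp [Prod.ext_iff]; ring

-- ===== VERDICT (by name: the statement is the Claim_ definition above) =====
theorem solution_spec : Claim_equal_solution := by
  intro angles _
  unfold Spec_solution solution solution_alt
  set f := angles.toList.filter (fun c => c == '<' || c == '>') with hf
  have hall : ∀ c ∈ reduceAll f, c = '<' ∨ c = '>' := by
    intro c hc
    have := reduceAll_mem f c hc
    rw [hf] at this
    have := List.of_mem_filter this
    simpa using this
  have hshape := irred_shape (reduceAll f) hall (reduceAll_irred f)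
  have hcalc : solLoopA angles.toList (0, 0)
      = (((reduceAll f).count '>' : Int), ((reduceAll f).count '<' : Int)) := by
    conv_lhs => rw [solLoopA_filter, ← hf, solLoopA_reduceAll f 0 0 le_rfl, hshape]
    rw [solLoopA_append, solLoopA_gt, solLoopA_lt]
    simp
  rw [hcalc]
  simp
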